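-- pv_equiv track=rewrite | github.com/DataDog/datadog-agent | tasks/libs/testing/e2e.py | create_test_selection_gotest_regex
-- ===== SOURCE A (Python) =====
-- def create_test_selection_gotest_regex(test_names: list[str]) -> str:
--     """
--     Create a gotest-compatible regex to exact-match the tests in the targets list.
--     Note that go test handles "/" quite specially:
--     - The argument is first split by "/", with each part being its own regex
--     - Each part then gets matched against the corresponding segment of the test name.
--     - If everything matches, the test is selected for execution.
--     See https://datadoghq.atlassian.net/wiki/x/rAX-0 for more details.
--
--     Each part is a regex, so we need to add ^$ around "/"s to ensure every segment is exact-matched.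
--
--     Note that in some cases the produced regex might select tests that are not in the original list.
--     For example, if the input is ["TestFoo", "TestBar/Ba", "TestBar/Baz"], the produced regex will be:
--     `"^(?:TestFoo|TestBar)$/^(?:Ba|Baz)$"`
--     But this regex would also match "TestFoo/Ba" for example, which is not in the original list.
--
--     Ex: ["TestFoo", "TestBar/Ba", "TestBar/Baz"] -> "^(?:TestFoo|TestBar)$/^(?:Ba|Baz)$"
--     """
--     if not test_names:
--         return ""
--
--     # Split the test names into component lists (handle each segment around "/" separately)
--     test_components = [name.split('/') for name in test_names]
--
--     # Pad all component lists to the same length with empty strings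
--     max_length = max(len(components) for components in test_components)
--     padded_components = [components + [""] * (max_length - len(components)) for components in test_components]
--
--     # We now have a rectangular matrix of components, where each row corresponds to a test name
--     # and each column corresponds to a same-level segment of the test name.
--     # Going column by column, we will create a regex for each segment.
--     regex_components = []
--     for col in range(max_length):
--         # Get all non-None components for the current column
--         # Use a set to avoid duplicates
--         column_components: set[str] = {components[col] for components in padded_components if components[col]}
--
--         # Sort the components alphabetically to ensure consistent ordering
--         column_components_sorted = sorted(column_components)
--
--         component = f"^(?:{'|'.join(column_components_sorted)})$"
--         regex_components.append(component)
--
--     regex_body = '/'.join(regex_components)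
--     return f'"{regex_body}"'
-- ===== SOURCE B (Python) =====
-- def _merge(columns, segs):
--     # grow the column list as needed; record each non-empty segment in its column's set
--     for i, seg in enumerate(segs):
--         if i == len(columns):
--             columns.append(set())
--         if seg:
--             columns[i].add(seg)
--     return columns
--
--
-- def create_test_selection_gotest_regex(test_names: list[str]) -> str:
--     if not test_names:
--         return ""
--     columns = []
--     for name in test_names:
--         _merge(columns, name.split('/'))
--     parts = ['^(?:' + '|'.join(sorted(col)) + ')$' for col in columns]
--     return '"' + '/'.join(parts) + '"'
-- ===== Notes on version B (the rewrite author's own statement) =====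
-- stated objective: simpler
-- what changed: B drops A's pad-to-rectangle matrix and column-by-column set comprehensions: it makes one merge pass over the names, accumulating a growing list of per-column sets, then formats each column.
import Mathlib
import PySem

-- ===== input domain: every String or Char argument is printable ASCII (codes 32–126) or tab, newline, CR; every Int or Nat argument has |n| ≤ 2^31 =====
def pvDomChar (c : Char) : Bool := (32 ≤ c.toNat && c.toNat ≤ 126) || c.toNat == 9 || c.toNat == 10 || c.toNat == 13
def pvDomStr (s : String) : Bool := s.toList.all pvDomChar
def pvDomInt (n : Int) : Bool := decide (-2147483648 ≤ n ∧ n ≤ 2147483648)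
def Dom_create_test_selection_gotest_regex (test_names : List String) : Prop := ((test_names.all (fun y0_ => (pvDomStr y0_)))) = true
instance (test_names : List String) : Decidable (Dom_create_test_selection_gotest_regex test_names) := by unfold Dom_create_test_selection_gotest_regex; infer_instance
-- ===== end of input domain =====

-- B replaces A's pad-to-rectangle matrix with a single merge pass accumulating per-column sets (objective: simpler).


-- ===== PORT A =====
def create_test_selection_gotest_regex (test_names : List String) : String :=
  if test_names = [] then ""
  else
    let test_components := test_names.map (fun name => (PySem.Str.split? name "/").getD [])
    let max_length : Nat := (PySem.List.max? (test_components.map (fun components => components.length)) (fun x => x)).getD 0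
    let padded_components := test_components.map (fun components => components ++ PySem.List.pyRepeat [""] ((max_length : Int) - (components.length : Int)))
    let regex_components := (PySem.List.pyRange 0 (max_length : Int) 1).foldl (fun acc col =>
      let column_components : PySem.Set String :=
        PySem.Set.ofList ((padded_components.map (fun components => PySem.List.pyGetD components col "")).filter (fun s => !(s == "")))
      let column_components_sorted := PySem.List.sorted column_components (fun x => x) false
      let component := "^(?:" ++ PySem.Str.join "|" column_components_sorted ++ ")$"
      acc ++ [component]) []
    let regex_body := PySem.Str.join "/" regex_components
    "\"" ++ regex_body ++ "\""

-- ===== PORT B =====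
-- _merge: grow the column list as needed; record each non-empty segment in its column's set
def pvMergeB (columns : List (PySem.Set String)) (segs : List String) : List (PySem.Set String) :=
  match columns, segs with
  | cols, [] => cols
  | [], s :: ss => (if s = "" then PySem.Set.empty else PySem.Set.add PySem.Set.empty s) :: pvMergeB [] ss
  | c :: cs, s :: ss => (if s = "" then c else PySem.Set.add c s) :: pvMergeB cs ss

def create_test_selection_gotest_regex_alt (test_names : List String) : String :=
  if test_names = [] then ""
  else
    let columns := test_names.foldl (fun cols name => pvMergeB cols ((PySem.Str.split? name "/").getD [])) []
    let parts := columns.map (fun col => "^(?:" ++ PySem.Str.join "|" (PySem.List.sorted col (fun x => x) false) ++ ")$")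
    "\"" ++ PySem.Str.join "/" parts ++ "\""

-- ===== PRECONDITION & SPEC =====
def Spec_create_test_selection_gotest_regex (test_names : List String) (out : String) : Prop := out = create_test_selection_gotest_regex_alt test_names
instance (test_names : List String) (out : String) : Decidable (Spec_create_test_selection_gotest_regex test_names out) := by unfold Spec_create_test_selection_gotest_regex; infer_instance

-- ===== CLAIM (what is proved, stated in full; the proofs are below) =====
def Claim_equal_create_test_selection_gotest_regex : Prop := ∀ (test_names : List String), Dom_create_test_selection_gotest_regex test_names → Spec_create_test_selection_gotest_regex test_names (create_test_selection_gotest_regex test_names)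

-- ===== LEMMAS AND PROOFS =====

-- the list of non-empty j-th segments, in row order
def pvCol (j : Nat) (rows : List (List String)) : List String :=
  (rows.map (fun r => r.getD j "")).filter (fun s => !(s == ""))

-- maximum row length
def pvMaxLen (rows : List (List String)) : Nat :=
  rows.foldl (fun m r => max m r.length) 0

theorem pvCol_append (j : Nat) (P : List (List String)) (r : List String) :
    pvCol j (P ++ [r]) = pvCol j P ++ pvCol j [r] := by
  simp [pvCol]

theorem pvCol_nil_of_le (j : Nat) (rows : List (List String)) (h : pvMaxLen rows ≤ j) :
    pvCol j rows = [] := by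
  have hlen : ∀ r ∈ rows, r.length ≤ pvMaxLen rows := by
    intro r hr
    have := (PySem.List.le_foldl_max_nat rows (fun r => r.length) 0).2 r hr
    simpa [pvMaxLen] using this
  simp only [pvCol, List.filter_eq_nil_iff]
  intro s hs
  rcases List.mem_map.mp hs with ⟨r, hr, rfl⟩
  have : r.length ≤ j := le_trans (hlen r hr) h
  simp [List.getD_eq_getElem?_getD, List.getElem?_eq_none this]

theorem pvMaxLen_append (P : List (List String)) (r : List String) :
    pvMaxLen (P ++ [r]) = max (pvMaxLen P) r.length := by
  simp [pvMaxLen]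

theorem ofList_append_singleton {α : Type} [BEq α] (l : List α) (x : α) :
    PySem.Set.ofList (l ++ [x]) = PySem.Set.add (PySem.Set.ofList l) x := by
  simp [PySem.Set.ofList_eq_foldl, List.foldl_append]

-- pointwise description of pvMergeB
theorem pvMergeB_spec (segs : List String) (cols : List (PySem.Set String)) :
    pvMergeB cols segs = (List.range (max cols.length segs.length)).map (fun j =>
      let s := segs.getD j ""
      if s = "" then cols.getD j PySem.Set.empty else PySem.Set.add (cols.getD j PySem.Set.empty) s) := by
  induction segs generalizing cols with
  | nil =>
    cases cols with
    | nil => simp [pvMergeB]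
    | cons c cs =>
      simp only [pvMergeB, List.length_nil, Nat.max_zero]
      apply List.ext_getElem
      · simp
      · intro i h1 h2
        simp [List.getD_eq_getElem?_getD, List.getElem?_eq_getElem h1]
  | cons s ss ih =>
    cases cols with
    | nil =>
      simp only [pvMergeB, List.length_nil, Nat.zero_max, List.length_cons,
        List.range_succ_eq_map, List.map_cons, List.map_map, ih]
      simp [Function.comp_def]
    | cons c cs =>
      simp only [pvMergeB, List.length_cons, Nat.succ_max_succ,
        List.range_succ_eq_map, List.map_cons, List.map_map, ih]
      simp [Function.comp_def]

-- the accumulated columns are exactly the per-column sets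
theorem foldl_mergeB_spec (rows : List (List String)) :
    rows.foldl (fun cols r => pvMergeB cols r) [] =
      (List.range (pvMaxLen rows)).map (fun j => PySem.Set.ofList (pvCol j rows)) := by
  induction rows using List.reverseRecOn with
  | nil => simp [pvMaxLen]
  | append_singleton P r ih =>
    rw [List.foldl_append, List.foldl_cons, List.foldl_nil, ih, pvMergeB_spec]
    have hgetD : ∀ j : Nat,
        ((List.range (pvMaxLen P)).map (fun j => PySem.Set.ofList (pvCol j P))).getD j PySem.Set.empty
          = PySem.Set.ofList (pvCol j P) := by
      intro j
      by_cases hj : j < pvMaxLen P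
      · simp [List.getD_eq_getElem?_getD, List.getElem?_map, List.getElem?_range hj]
      · rw [List.getD_eq_getElem?_getD, List.getElem?_eq_none (by simpa using Nat.le_of_not_lt hj)]
        simp [pvCol_nil_of_le j P (Nat.le_of_not_lt hj), PySem.Set.ofList, PySem.Set.empty]
    rw [pvMaxLen_append]
    simp only [List.length_map, List.length_range, List.getD_eq_getElem?_getD]
    apply List.map_congr_left
    intro j _
    rw [show ∀ j : ℕ, (List.map (fun j => PySem.Set.ofList (pvCol j P)) (List.range (pvMaxLen P)))[j]?.getD PySem.Set.empty = PySem.Set.ofList (pvCol j P) from fun j => by rw [← List.getD_eq_getElem?_getD]; exact hgetD j, pvCol_append]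
    by_cases hs : r[j]?.getD "" = ""
    · have hc : pvCol j [r] = [] := by simp [pvCol, List.getD_eq_getElem?_getD, hs]
      simp [hs, hc]
    · have hc : pvCol j [r] = [r[j]?.getD ""] := by simp [pvCol, List.getD_eq_getElem?_getD, hs]
      simp [hs, hc, ofList_append_singleton]

-- padding with "" does not change getD with default ""
theorem getD_pad (c : List String) (k : Nat) (j : Nat) :
    (c ++ List.replicate k "").getD j "" = c.getD j "" := by
  by_cases hj : j < c.length
  · rw [List.getD_eq_getElem?_getD, List.getElem?_append_left hj, ← List.getD_eq_getElem?_getD]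
  · rw [List.getD_eq_getElem?_getD, List.getD_eq_getElem?_getD,
      List.getElem?_eq_none (by omega : c.length ≤ j)]
    rcases Nat.lt_or_ge j (c.length + k) with h | h
    · rw [List.getElem?_append_right (by omega), List.getElem?_replicate_of_lt (by omega)]
      rfl
    · rw [List.getElem?_eq_none (by simpa using h)]

-- A's max_length equals pvMaxLen on a non-empty list
theorem maxlen_eq (r : String) (rs : List String) :
    (PySem.List.max? (((r :: rs).map (fun name => (PySem.Str.split? name "/").getD [])).map (fun c => c.length)) (fun x => x)).getD 0
      = pvMaxLen ((r :: rs).map (fun name => (PySem.Str.split? name "/").getD [])) := by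
  simp [PySem.List.max?_id_cons, pvMaxLen, List.foldl_map]

-- ===== VERDICT (by name: the statement is the Claim_ definition above) =====
set_option maxHeartbeats 1000000 in
theorem create_test_selection_gotest_regex_spec : Claim_equal_create_test_selection_gotest_regex := by
  intro test_names _
  unfold Spec_create_test_selection_gotest_regex
  unfold create_test_selection_gotest_regex create_test_selection_gotest_regex_alt
  cases test_names with
  | nil => simp
  | cons n ns =>
    simp only [reduceCtorEq, if_false]
    rw [show List.foldl (fun cols name => pvMergeB cols ((PySem.Str.split? name "/").getD [])) [] (n :: ns)
          = List.foldl (fun cols r => pvMergeB cols r) [] ((n :: ns).map (fun name => (PySem.Str.split? name "/").getD []))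
        from List.foldl_map.symm, foldl_mergeB_spec]
    set rows := ((n :: ns).map (fun name => (PySem.Str.split? name "/").getD [])) with hrows
    rw [maxlen_eq]
    congr 1
    congr 1
    -- A's loop over pyRange builds the same list of components
    rw [PySem.List.foldl_append_singleton_eq_map, List.nil_append,
        PySem.List.pyRange_zero_natCast, List.map_map]
    congr 1
    conv_rhs => rw [List.map_map]
    simp only [← hrows]
    apply List.map_congr_left
    intro j _
    simp only [Function.comp_def]
    congr 2
    -- the column set A builds equals ofList (pvCol j rows)
    simp only [PySem.List.pyGetD_natCast, List.map_map]
    unfold pvCol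
    congr 4
    apply List.map_congr_left
    intro r _
    simp only [Function.comp_def]
    rw [show PySem.List.pyRepeat [""] ((pvMaxLen rows : Int) - (r.length : Int)) =
        List.replicate ((pvMaxLen rows : Int) - (r.length : Int)).toNat "" from PySem.List.pyRepeat_singleton _ _]
    exact getD_pad r _ j
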